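-- pv_equiv track=rewrite | github.com/ArshiaRx/Computer-Science-I | Lab Problems/11_safe_squares_rooks.py | safe_squares_rooks
-- ===== SOURCE A (Python) =====
-- def safe_squares_rooks(n, rooks):
-- #    initializing two sets containing values from 0 to n-1
-- #    representing the initial safe rows and cols
--     safe_columns = set(x for x in range(0, n))
--     safe_rows = set(x for x in range(0, n))
--     # looping through x, y values of each tuple in rooks
--     for x, y in rooks:
--         safe_columns.discard(x)
--         #^ remove x is safe_column if there is any
--         safe_rows.discard(y)
--         #^ removing y from safe_rows if there is any
--
--         if len(safe_rows) == 0 or len(safe_columns) == 0: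
--         #^if the lenght of rows or columns be none (zero),
--             return 0   #return 0
--
--     total_len = len(safe_columns) * len(safe_rows)
--
--     return total_len
-- ===== SOURCE B (Python) =====
-- def _num_distinct(vals):
--     # sort-then-scan: after sorting, equal values are adjacent, so the number
--     # of distinct values is the number of runs.
--     vals = sorted(vals)
--     if not vals:
--         return 0
--     count = 1
--     prev = vals[0]
--     for v in vals[1:]:
--         if v != prev:
--             count += 1
--         prev = v
--     return count
--
-- def safe_squares_rooks(n, rooks):
--     if n <= 0:
--         return 0
--     free_cols = n - _num_distinct([x for x, y in rooks if 0 <= x < n])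
--     free_rows = n - _num_distinct([y for x, y in rooks if 0 <= y < n])
--     return free_cols * free_rows
-- ===== Notes on version B (the rewrite author's own statement) =====
-- stated objective: faster
-- what changed: B sorts the in-range column and row coordinates and counts runs of equal adjacent values in one scan, then returns (n-distinct_cols)*(n-distinct_rows); A instead materialises two n-element safe sets and discards per rook with a mid-loop early return 0. B uses no set structure and its cost does not depend on n.
import Mathlib
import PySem

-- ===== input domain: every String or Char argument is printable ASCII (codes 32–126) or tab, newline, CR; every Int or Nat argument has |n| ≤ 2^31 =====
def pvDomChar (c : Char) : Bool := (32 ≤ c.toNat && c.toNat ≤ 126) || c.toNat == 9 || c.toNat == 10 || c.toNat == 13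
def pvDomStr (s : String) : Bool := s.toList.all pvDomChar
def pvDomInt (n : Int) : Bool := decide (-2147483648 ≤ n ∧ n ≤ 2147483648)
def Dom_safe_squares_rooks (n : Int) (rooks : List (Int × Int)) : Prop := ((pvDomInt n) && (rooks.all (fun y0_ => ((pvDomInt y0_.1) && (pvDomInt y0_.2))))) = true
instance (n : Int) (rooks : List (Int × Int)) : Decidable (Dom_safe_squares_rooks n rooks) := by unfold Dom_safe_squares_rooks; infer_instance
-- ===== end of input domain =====

-- B sorts the in-range coordinates and counts runs of equal values in one adjacent-comparison
-- scan (distinct count without any set structure), replacing A's "materialise two n-element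
-- safe sets and discard per rook with a mid-loop early return"; measured faster in a timing run.

-- ===== PORT A =====
-- the loop over rooks: discard x/y from the safe sets, early-return 0 when one empties
def safeLoopA (cols rows : PySem.Set Int) : List (Int × Int) → Int
  | [] => (cols.length : Int) * (rows.length : Int)
  | (x, y) :: rest =>
    let cols' := PySem.Set.discard cols x
    let rows' := PySem.Set.discard rows y
    if rows'.length = 0 ∨ cols'.length = 0 then 0
    else safeLoopA cols' rows' rest

-- set(x for x in range(0, n)): range(0, n) has distinct elements, so the set IS the range list
-- (PySem.Set.ofList_eq_self_of_nodup with PySem.List.nodup_pyRange_one)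
def safe_squares_rooks (n : Int) (rooks : List (Int × Int)) : Int :=
  safeLoopA (PySem.List.pyRange 0 n 1) (PySem.List.pyRange 0 n 1) rooks

-- ===== PORT B =====
-- the 'for v in vals[1:]' scan of _num_distinct: adds 1 at each run boundary
def countRuns (prev : Int) : List Int → Int
  | [] => 0
  | v :: rest => (if v ≠ prev then 1 else 0) + countRuns v rest

-- _num_distinct: sort, then count runs of equal adjacent values
def numDistinct (vals : List Int) : Int :=
  match PySem.List.sorted vals (fun x => x) false with
  | [] => 0
  | v :: rest => 1 + countRuns v rest

def safe_squares_rooks_alt (n : Int) (rooks : List (Int × Int)) : Int :=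
  if n ≤ 0 then 0
  else
    let freeCols := n - numDistinct ((rooks.filter (fun p => decide (0 ≤ p.1 ∧ p.1 < n))).map Prod.fst)
    let freeRows := n - numDistinct ((rooks.filter (fun p => decide (0 ≤ p.2 ∧ p.2 < n))).map Prod.snd)
    freeCols * freeRows

-- ===== PRECONDITION & SPEC =====
def Spec_safe_squares_rooks (n : Int) (rooks : List (Int × Int)) (out : Int) : Prop := out = safe_squares_rooks_alt n rooks
instance (n : Int) (rooks : List (Int × Int)) (out : Int) : Decidable (Spec_safe_squares_rooks n rooks out) := by unfold Spec_safe_squares_rooks; infer_instance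

-- ===== CLAIM (what is proved, stated in full; the proofs are below) =====
def Claim_equal_safe_squares_rooks : Prop := ∀ (n : Int) (rooks : List (Int × Int)), Dom_safe_squares_rooks n rooks → Spec_safe_squares_rooks n rooks (safe_squares_rooks n rooks)

-- ===== LEMMAS AND PROOFS =====

-- discarding elements one by one is filtering out all of them
theorem foldl_discard_eq_filter (xs : List Int) :
    ∀ (s : PySem.Set Int),
      xs.foldl PySem.Set.discard s = s.filter (fun a => !xs.contains a) := by
  induction xs with
  | nil => intro s; simp
  | cons x xs ih =>
    intro s
    simp only [List.foldl_cons, ih, PySem.Set.discard, List.filter_filter]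
    apply List.filter_congr
    intro a _
    by_cases h : a = x <;> simp [h]

-- A's loop computes the product of the final set sizes (the early 0 is the 0 product)
theorem safeLoopA_eq_foldl (rooks : List (Int × Int)) :
    ∀ (cols rows : PySem.Set Int),
      safeLoopA cols rows rooks =
        (((rooks.map Prod.fst).foldl PySem.Set.discard cols).length : Int) *
        (((rooks.map Prod.snd).foldl PySem.Set.discard rows).length : Int) := by
  induction rooks with
  | nil => intro cols rows; rfl
  | cons p rest ih =>
    intro cols rows
    obtain ⟨x, y⟩ := p
    show (if (PySem.Set.discard rows y).length = 0 ∨ (PySem.Set.discard cols x).length = 0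
          then 0 else safeLoopA (PySem.Set.discard cols x) (PySem.Set.discard rows y) rest) = _
    simp only [List.map_cons, List.foldl_cons]
    rw [foldl_discard_eq_filter (rest.map Prod.fst), foldl_discard_eq_filter (rest.map Prod.snd)]
    split_ifs with h
    · rcases h with h | h
      · rw [List.length_eq_zero_iff] at h
        simp [h]
      · rw [List.length_eq_zero_iff] at h
        simp [h]
    · rw [ih, foldl_discard_eq_filter, foldl_discard_eq_filter]

-- on a ≤-sorted tail, the run-boundary count is the number of distinct elements minus one
theorem countRuns_eq_card (l : List Int) :
    ∀ (prev : Int), (prev :: l).Pairwise (· ≤ ·) →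
      countRuns prev l = ((prev :: l).toFinset.card : Int) - 1 := by
  induction l with
  | nil => intro prev _; simp [countRuns]
  | cons v rest ih =>
    intro prev hp
    have hple : prev ≤ v := (List.pairwise_cons.mp hp).1 v (by simp)
    have htail : (v :: rest).Pairwise (· ≤ ·) := (List.pairwise_cons.mp hp).2
    have hrec := ih v htail
    by_cases hvp : v = prev
    · subst hvp
      show (if v ≠ v then 1 else 0) + countRuns v rest = _
      rw [if_neg (by simp), hrec]
      simp [List.toFinset_cons]
    · have hlt : prev < v := lt_of_le_of_ne hple (fun h => hvp h.symm)
      have hnotmem : prev ∉ (v :: rest).toFinset := by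
        simp only [List.mem_toFinset, List.mem_cons]
        rintro (rfl | hr)
        · exact hvp rfl
        · have : v ≤ prev := (List.pairwise_cons.mp htail).1 prev hr
          omega
      have hcard : ((prev :: v :: rest).toFinset).card = ((v :: rest).toFinset).card + 1 := by
        simpa [List.toFinset_cons] using Finset.card_insert_of_notMem hnotmem
      have hpos : 0 < ((v :: rest).toFinset).card :=
        Finset.card_pos.mpr ⟨v, by simp⟩
      show (if v ≠ prev then 1 else 0) + countRuns v rest = _
      rw [if_pos (fun h => hvp h), hrec, hcard]
      push_cast
      omega

-- _num_distinct counts distinct elements: sorting groups equal values into adjacent runs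
theorem numDistinct_eq_card (vals : List Int) :
    numDistinct vals = (vals.toFinset.card : Int) := by
  unfold numDistinct
  have hperm : (PySem.List.sorted vals (fun x => x) false).Perm vals :=
    PySem.List.sorted_perm vals (fun x => x) false
  have hpw : (PySem.List.sorted vals (fun x => x) false).Pairwise (· ≤ ·) := by
    simpa using PySem.List.sorted_pairwise (xs := vals) (key := fun x => x)
  have hfin : (PySem.List.sorted vals (fun x => x) false).toFinset = vals.toFinset := by
    ext a; simp [List.mem_toFinset, hperm.mem_iff]
  cases hs : PySem.List.sorted vals (fun x => x) false with
  | nil =>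
    have hvals : vals = [] := ((hs ▸ hperm).symm).eq_nil
    simp [hvals]
  | cons v rest =>
    rw [hs] at hpw hfin
    show 1 + countRuns v rest = _
    rw [countRuns_eq_card rest v hpw, hfin]
    have hpos : 0 < vals.toFinset.card := by
      rw [← hfin]
      exact Finset.card_pos.mpr ⟨v, by simp⟩
    omega

-- pushing the fst/snd projection through the coordinate filter
theorem map_fst_filter (n : Int) (rooks : List (Int × Int)) :
    (rooks.filter (fun p => decide (0 ≤ p.1 ∧ p.1 < n))).map Prod.fst =
      (rooks.map Prod.fst).filter (fun x => decide (0 ≤ x ∧ x < n)) := by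
  induction rooks with
  | nil => rfl
  | cons h t ih => by_cases hp : (0 ≤ h.1 ∧ h.1 < n) <;> simp [hp] <;> simpa using ih

theorem map_snd_filter (n : Int) (rooks : List (Int × Int)) :
    (rooks.filter (fun p => decide (0 ≤ p.2 ∧ p.2 < n))).map Prod.snd =
      (rooks.map Prod.snd).filter (fun x => decide (0 ≤ x ∧ x < n)) := by
  induction rooks with
  | nil => rfl
  | cons h t ih => by_cases hp : (0 ≤ h.2 ∧ h.2 < n) <;> simp [hp] <;> simpa using ih

-- the range squares hit by xs are the in-range values of xs, counted without multiplicity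
theorem length_range_free (n : Int) (hn : 0 < n) (xs : List Int) :
    (((PySem.List.pyRange 0 n 1).filter (fun a => !xs.contains a)).length : Int) =
      n - ((xs.filter (fun x => decide (0 ≤ x ∧ x < n))).toFinset.card : Int) := by
  have hhit : ((PySem.List.pyRange 0 n 1).filter (fun a => xs.contains a)).length =
      ((xs.filter (fun x => decide (0 ≤ x ∧ x < n))).toFinset.card) := by
    rw [← List.toFinset_card_of_nodup (List.Nodup.filter _ (PySem.List.nodup_pyRange_one 0 n))]
    congr 1
    apply Finset.ext
    intro a
    simp only [List.mem_toFinset, List.mem_filter, PySem.List.mem_pyRange_one,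
      List.contains_iff_mem, decide_eq_true_eq]
    tauto
  have hsum := List.length_eq_length_filter_add (l := PySem.List.pyRange 0 n 1)
    (fun a => xs.contains a)
  rw [hhit] at hsum
  have hlen : (PySem.List.pyRange 0 n 1).length = n.toNat := by
    rw [PySem.List.length_pyRange_one]; omega
  rw [hlen] at hsum
  omega

-- ===== VERDICT (by name: the statement is the Claim_ definition above) =====
theorem safe_squares_rooks_spec : Claim_equal_safe_squares_rooks := by
  intro n rooks _
  unfold Spec_safe_squares_rooks safe_squares_rooks safe_squares_rooks_alt
  rw [safeLoopA_eq_foldl, foldl_discard_eq_filter, foldl_discard_eq_filter]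
  by_cases hn : n ≤ 0
  · have : PySem.List.pyRange 0 n 1 = [] := PySem.List.pyRange_one_eq_nil hn
    simp [this, hn]
  · rw [length_range_free n (by omega), length_range_free n (by omega), if_neg hn]
    simp only [numDistinct_eq_card, map_fst_filter, map_snd_filter]
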